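-- pv_equiv track=rewrite | github.com/DanAlexMorton/OldWorldSimulator | run_game.py | get_unit_type
-- ===== SOURCE A (Python) =====
-- def get_unit_type(unit_name: str, can_shoot: bool) -> str:
--     """Determine unit type from name."""
--     name_lower = unit_name.lower()
--
--     # Artillery
--     if any(w in name_lower for w in ["cannon", "mortar", "bolt thrower",
--                                       "doom diver", "rock lobber", "helblaster"]):
--         return "artillery"
--
--     # Cavalry
--     if any(w in name_lower for w in ["knight", "rider", "cavalry", "boar boyz",
--                                       "demigryph", "wolf rider"]):
--         return "cavalry"
--
--     # Monsters
--     if any(w in name_lower for w in ["giant", "troll", "dragon", "hydra",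
--                                       "arachnarok", "griffon"]):
--         return "monster"
--
--     # Characters
--     if any(w in name_lower for w in ["general", "captain", "lord", "warboss",
--                                       "wizard", "shaman", "priest", "boss"]):
--         return "character"
--
--     # Ranged
--     if can_shoot:
--         return "ranged"
--
--     return "infantry"
-- ===== SOURCE B (Python) =====
-- # Single flat pass over a keyword->type table keeping the best (minimal-precedence-rank)
-- # match in an accumulator; no early returns, no per-category blocks.
-- KEYWORD_TYPES = [
--     ("cannon", "artillery"), ("mortar", "artillery"), ("bolt thrower", "artillery"),
--     ("doom diver", "artillery"), ("rock lobber", "artillery"), ("helblaster", "artillery"),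
--     ("knight", "cavalry"), ("rider", "cavalry"), ("cavalry", "cavalry"),
--     ("boar boyz", "cavalry"), ("demigryph", "cavalry"), ("wolf rider", "cavalry"),
--     ("giant", "monster"), ("troll", "monster"), ("dragon", "monster"),
--     ("hydra", "monster"), ("arachnarok", "monster"), ("griffon", "monster"),
--     ("general", "character"), ("captain", "character"), ("lord", "character"),
--     ("warboss", "character"), ("wizard", "character"), ("shaman", "character"),
--     ("priest", "character"), ("boss", "character"),
-- ]
--
-- RANK = {"artillery": 0, "cavalry": 1, "monster": 2, "character": 3}
--
--
-- def get_unit_type(unit_name: str, can_shoot: bool) -> str: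
--     """Determine unit type from name."""
--     name = unit_name.lower()
--     best = None
--     for kw, t in KEYWORD_TYPES:
--         if kw in name and (best is None or RANK[t] < RANK[best]):
--             best = t
--     if best is not None:
--         return best
--     return "ranged" if can_shoot else "infantry"
-- ===== Notes on version B (the rewrite author's own statement) =====
-- stated objective: alternative
-- what changed: Replaces A's four short-circuiting per-category if/any blocks with one exhaustive pass over a flat keyword->type table that maintains a minimal-precedence-rank accumulator and selects the best match at the end.
import Mathlib
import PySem

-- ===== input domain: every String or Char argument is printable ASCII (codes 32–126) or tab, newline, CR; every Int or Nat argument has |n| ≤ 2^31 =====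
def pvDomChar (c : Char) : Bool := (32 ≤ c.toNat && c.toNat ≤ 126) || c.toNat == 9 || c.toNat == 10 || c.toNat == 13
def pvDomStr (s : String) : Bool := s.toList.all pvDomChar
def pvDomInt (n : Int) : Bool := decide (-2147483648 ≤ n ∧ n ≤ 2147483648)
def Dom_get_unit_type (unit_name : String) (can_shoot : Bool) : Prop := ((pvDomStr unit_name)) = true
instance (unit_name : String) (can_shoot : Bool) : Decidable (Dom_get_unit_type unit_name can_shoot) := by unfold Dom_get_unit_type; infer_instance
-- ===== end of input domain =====

-- B replaces A's four short-circuiting per-category blocks with one exhaustive pass over a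
-- flat keyword->type table keeping a minimal-precedence-rank accumulator (objective: alternative).

-- ===== PORT A =====
def get_unit_type (unit_name : String) (can_shoot : Bool) : String :=
  let name_lower := PySem.Str.lower unit_name
  if ["cannon", "mortar", "bolt thrower", "doom diver", "rock lobber",
      "helblaster"].any (fun w => PySem.Str.isIn w name_lower) then "artillery"
  else if ["knight", "rider", "cavalry", "boar boyz", "demigryph",
      "wolf rider"].any (fun w => PySem.Str.isIn w name_lower) then "cavalry"
  else if ["giant", "troll", "dragon", "hydra", "arachnarok",
      "griffon"].any (fun w => PySem.Str.isIn w name_lower) then "monster"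
  else if ["general", "captain", "lord", "warboss", "wizard", "shaman",
      "priest", "boss"].any (fun w => PySem.Str.isIn w name_lower) then "character"
  else if can_shoot then "ranged"
  else "infantry"

-- ===== PORT B =====
-- the flat KEYWORD_TYPES table of Source B
def pvTable : List (String × String) :=
  [("cannon", "artillery"), ("mortar", "artillery"), ("bolt thrower", "artillery"),
   ("doom diver", "artillery"), ("rock lobber", "artillery"), ("helblaster", "artillery"),
   ("knight", "cavalry"), ("rider", "cavalry"), ("cavalry", "cavalry"),
   ("boar boyz", "cavalry"), ("demigryph", "cavalry"), ("wolf rider", "cavalry"),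
   ("giant", "monster"), ("troll", "monster"), ("dragon", "monster"),
   ("hydra", "monster"), ("arachnarok", "monster"), ("griffon", "monster"),
   ("general", "character"), ("captain", "character"), ("lord", "character"),
   ("warboss", "character"), ("wizard", "character"), ("shaman", "character"),
   ("priest", "character"), ("boss", "character")]

-- RANK[t]; total match, exact on the four types occurring in the table (the only lookups Source B makes)
def pvRank (t : String) : Nat :=
  if t = "artillery" then 0
  else if t = "cavalry" then 1
  else if t = "monster" then 2
  else 3

-- the loop body: keep the match of minimal rank
def pvStep (name : String) (best : Option String) (e : String × String) : Option String :=
  if PySem.Str.isIn e.1 name &&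
      (match best with
       | none => true
       | some b => decide (pvRank e.2 < pvRank b)) then some e.2 else best

def get_unit_type_alt (unit_name : String) (can_shoot : Bool) : String :=
  let name := PySem.Str.lower unit_name
  match pvTable.foldl (pvStep name) none with
  | some t => t
  | none => if can_shoot then "ranged" else "infantry"

-- ===== PRECONDITION & SPEC =====
def Spec_get_unit_type (unit_name : String) (can_shoot : Bool) (out : String) : Prop := out = get_unit_type_alt unit_name can_shoot
instance (unit_name : String) (can_shoot : Bool) (out : String) : Decidable (Spec_get_unit_type unit_name can_shoot out) := by unfold Spec_get_unit_type; infer_instance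

-- ===== CLAIM =====
def Claim_equal_get_unit_type : Prop := ∀ (unit_name : String) (can_shoot : Bool), Dom_get_unit_type unit_name can_shoot → Spec_get_unit_type unit_name can_shoot (get_unit_type unit_name can_shoot)

-- ===== LEMMAS AND PROOFS =====

-- once the accumulator holds a type whose rank no later entry beats, the fold keeps it
theorem pvFold_keep (name b : String) (l : List (String × String))
    (h : ∀ e ∈ l, ¬ pvRank e.2 < pvRank b) :
    l.foldl (pvStep name) (some b) = some b := by
  induction l with
  | nil => rfl
  | cons e rest ih =>
    have he := h e (List.mem_cons_self ..)
    simp only [List.foldl_cons, pvStep]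
    rw [if_neg (by simp [he])]
    exact ih (fun e' h' => h e' (List.mem_cons_of_mem _ h'))

-- scanning one category's group from an empty accumulator yields that type iff any keyword matches
theorem pvFold_group (name t : String) (ws : List String) :
    (ws.map (fun w => (w, t))).foldl (pvStep name) none =
      (if ws.any (fun w => PySem.Str.isIn w name) then some t else none) := by
  induction ws with
  | nil => rfl
  | cons w rest ih =>
    rw [List.map_cons, List.foldl_cons, List.any_cons]
    cases hw : PySem.Str.isIn w name with
    | true =>
      have hw' : PySem.Chars.isIn w.toList name.toList = true := by simpa using hw
      have hstep : pvStep name none (w, t) = some t := by simp [pvStep, hw']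
      rw [hstep, pvFold_keep name t _
        (by intro e he; obtain ⟨w', _, rfl⟩ := List.mem_map.mp he; simp),
        Bool.true_or, if_pos rfl]
    | false =>
      have hw' : PySem.Chars.isIn w.toList name.toList = false := by simpa using hw
      have hstep : pvStep name none (w, t) = none := by simp [pvStep, hw']
      rw [hstep, ih]
      simp only [Bool.false_or]

-- ===== VERDICT =====
theorem get_unit_type_spec : Claim_equal_get_unit_type := by
  intro unit_name can_shoot _
  show get_unit_type unit_name can_shoot = get_unit_type_alt unit_name can_shoot
  unfold get_unit_type get_unit_type_alt
  set nl := PySem.Str.lower unit_name with hnl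
  have htab : pvTable =
      (["cannon", "mortar", "bolt thrower", "doom diver", "rock lobber",
        "helblaster"].map (fun w => (w, "artillery"))) ++
      ((["knight", "rider", "cavalry", "boar boyz", "demigryph",
        "wolf rider"].map (fun w => (w, "cavalry"))) ++
      ((["giant", "troll", "dragon", "hydra", "arachnarok",
        "griffon"].map (fun w => (w, "monster"))) ++
      (["general", "captain", "lord", "warboss", "wizard", "shaman",
        "priest", "boss"].map (fun w => (w, "character"))))) := by rfl
  have kCav := fun b h => pvFold_keep nl b
    (["knight", "rider", "cavalry", "boar boyz", "demigryph",
      "wolf rider"].map (fun w => (w, "cavalry"))) h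
  have kMon := fun b h => pvFold_keep nl b
    (["giant", "troll", "dragon", "hydra", "arachnarok",
      "griffon"].map (fun w => (w, "monster"))) h
  have kChar := fun b h => pvFold_keep nl b
    (["general", "captain", "lord", "warboss", "wizard", "shaman",
      "priest", "boss"].map (fun w => (w, "character"))) h
  rw [htab]
  simp only [List.foldl_append]
  rw [pvFold_group]
  by_cases h1 : (["cannon", "mortar", "bolt thrower", "doom diver", "rock lobber",
      "helblaster"].any (fun w => PySem.Str.isIn w nl)) = true
  · rw [if_pos h1, if_pos h1, kCav "artillery" (by decide),
      kMon "artillery" (by decide), kChar "artillery" (by decide)]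
  · rw [if_neg h1, if_neg h1, pvFold_group]
    by_cases h2 : (["knight", "rider", "cavalry", "boar boyz", "demigryph",
        "wolf rider"].any (fun w => PySem.Str.isIn w nl)) = true
    · rw [if_pos h2, if_pos h2, kMon "cavalry" (by decide), kChar "cavalry" (by decide)]
    · rw [if_neg h2, if_neg h2, pvFold_group]
      by_cases h3 : (["giant", "troll", "dragon", "hydra", "arachnarok",
          "griffon"].any (fun w => PySem.Str.isIn w nl)) = true
      · rw [if_pos h3, if_pos h3, kChar "monster" (by decide)]
      · rw [if_neg h3, if_neg h3, pvFold_group]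
        by_cases h4 : (["general", "captain", "lord", "warboss", "wizard", "shaman",
            "priest", "boss"].any (fun w => PySem.Str.isIn w nl)) = true
        · rw [if_pos h4, if_pos h4]
        · rw [if_neg h4, if_neg h4]
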